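-- pv_equiv track=rewrite | github.com/hyungmogu/algorithm-and-data-structure-exercises | codility_practice/leader/dominator_02.py | solution
-- ===== SOURCE A (Python) =====
-- def solution(A):
--     N = len(A)
--     index = 0
--     number_frequency = {}
--
--     if N == 0:
--         return -1
--
--     if N == 1:
--         return 0
--
--     #   1. for each number and index in A
--     while index < N:
--         number = A[index]
--         #   2. if number in number_frequency, raise count by 1, or if not, set its value to 1
--         if number in number_frequency:
--             number_frequency[number] += 1
--         else:
--             number_frequency[number] = 1
--
--         #   3. if number_frequency[number] is dominator, then return index
--         if is_dominator(number_frequency[number], N):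
--             return index
--
--         index +=1
--     #   4. if all fails, then return -1
--     return -1
--
-- def is_dominator(number_count, N):
--     if number_count > (N // 2):
--         return True
--
--     return False
-- ===== SOURCE B (Python) =====
-- def solution(A):
--     n = len(A)
--     if n == 0:
--         return -1
--     # Boyer-Moore majority vote
--     cand, cnt = A[0], 0
--     for x in A:
--         if cnt == 0:
--             cand, cnt = x, 1
--         elif x == cand:
--             cnt += 1
--         else:
--             cnt -= 1
--     half = n // 2
--     if A.count(cand) <= half:
--         return -1
--     # first index where the majority element's running count exceeds half
--     run = 0
--     i = 0
--     for x in A: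
--         if x == cand:
--             run += 1
--             if run > half:
--                 return i
--         i += 1
--     return -1
-- ===== Notes on version B (the rewrite author's own statement) =====
-- stated objective: faster
-- what changed: Replaces the per-index hash-map frequency loop with Boyer-Moore majority voting (O(1) extra space, single candidate/counter) plus a verification/locating scan over the plain list.
import Mathlib
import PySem

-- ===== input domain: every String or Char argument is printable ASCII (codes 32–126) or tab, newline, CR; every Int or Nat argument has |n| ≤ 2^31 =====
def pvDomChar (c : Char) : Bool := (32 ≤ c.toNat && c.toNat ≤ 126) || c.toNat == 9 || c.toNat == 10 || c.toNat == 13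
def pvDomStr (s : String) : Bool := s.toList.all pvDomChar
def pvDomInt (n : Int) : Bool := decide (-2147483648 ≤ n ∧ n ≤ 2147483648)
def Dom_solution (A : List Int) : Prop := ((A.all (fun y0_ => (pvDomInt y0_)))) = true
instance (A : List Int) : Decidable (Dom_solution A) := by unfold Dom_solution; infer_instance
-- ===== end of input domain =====

-- B replaces A's hash-map running-frequency loop with Boyer-Moore majority voting plus a verification/locating scan (O(1) extra space).

-- ===== PORT A =====
def isDominator (numberCount N : Int) : Bool :=
  if numberCount > PySem.Int.floordiv N 2 then true else false

def solutionLoop (A : List Int) (N : Int) (d : PySem.Dict Int Int) (index : Int) : Int :=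
  if _h : index < N then
    let number := PySem.List.pyGetD A index 0   -- A[index]; in range since 0 ≤ index < N = len A
    let d' := if d.contains number then d.modify number 0 (· + 1) else d.insert number 1
    if isDominator (d'.getD number 0) N then index
    else solutionLoop A N d' (index + 1)
  else -1
termination_by (N - index).toNat
decreasing_by omega

def solution (A : List Int) : Int :=
  let N : Int := A.length
  if N = 0 then -1
  else if N = 1 then 0
  else solutionLoop A N PySem.Dict.empty 0

-- ===== PORT B =====
def bmStep (s : Int × Int) (x : Int) : Int × Int :=
  if s.2 = 0 then (x, 1)
  else if x = s.1 then (s.1, s.2 + 1)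
  else (s.1, s.2 - 1)

def scanLoop (cand half : Int) : List Int → Int → Int → Int
  | [], _, _ => -1
  | x :: xs, i, run =>
    if x = cand then
      if run + 1 > half then i
      else scanLoop cand half xs (i + 1) (run + 1)
    else scanLoop cand half xs (i + 1) run

def solution_alt (A : List Int) : Int :=
  let n : Int := A.length
  if n = 0 then -1
  else
    let s := A.foldl bmStep (PySem.List.pyGetD A 0 0, 0)
    let half := PySem.Int.floordiv n 2
    if (A.count s.1 : Int) ≤ half then -1
    else scanLoop s.1 half A 0 0

-- ===== PRECONDITION & SPEC =====
def Spec_solution (A : List Int) (out : Int) : Prop := out = solution_alt A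
instance (A : List Int) (out : Int) : Decidable (Spec_solution A out) := by unfold Spec_solution; infer_instance

-- ===== CLAIM (what is proved, stated in full; the proofs are below) =====
def Claim_equal_solution : Prop := ∀ (A : List Int), Dom_solution A → Spec_solution A (solution A)

-- ===== LEMMAS AND PROOFS =====

-- Boyer-Moore invariant: weighted count bound through the fold.
theorem bm_inv (l : List Int) (c k : Int) (hk : 0 ≤ k) :
    0 ≤ (l.foldl bmStep (c, k)).2 ∧
      ∀ x, 2 * (l.count x : Int) + (if x = c then 2 * k else 0) ≤
        (l.length : Int) + k - (l.foldl bmStep (c, k)).2 +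
          (if x = (l.foldl bmStep (c, k)).1 then 2 * (l.foldl bmStep (c, k)).2 else 0) := by
  induction l generalizing c k with
  | nil => exact ⟨hk, fun x => by simp⟩
  | cons a l ih =>
    simp only [List.foldl_cons, List.length_cons]
    by_cases hk0 : k = 0
    · subst hk0
      have h := ih a 1 (by omega)
      refine ⟨h.1, fun x => ?_⟩
      have hx := h.2 x
      simp only [bmStep]
      rw [List.count_cons]
      by_cases hxa : x = a <;> simp [hxa] at hx ⊢ <;> omega
    · by_cases hac : a = c
      · have hstep : bmStep (c, k) a = (c, k + 1) := by simp [bmStep, hk0, hac]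
        rw [hstep]
        have h := ih c (k + 1) (by omega)
        refine ⟨h.1, fun x => ?_⟩
        have hx := h.2 x
        rw [List.count_cons]
        by_cases hxc : x = c <;> simp [hxc, hac] at hx ⊢ <;> omega
      · have hstep : bmStep (c, k) a = (c, k - 1) := by simp [bmStep, hk0, hac]
        rw [hstep]
        have h := ih c (k - 1) (by omega)
        refine ⟨h.1, fun x => ?_⟩
        have hx := h.2 x
        rw [List.count_cons]
        by_cases hxa : x = a
        · subst hxa
          simp [if_neg hac] at hx ⊢
          omega
        · by_cases hxc : x = c <;> simp [hxc] at hx ⊢ <;> omega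

-- Any strict majority element is the Boyer-Moore candidate.
theorem bm_majority (A : List Int) (c x : Int)
    (hx : (A.length : Int) < 2 * (A.count x : Int)) :
    x = (A.foldl bmStep (c, 0)).1 := by
  obtain ⟨h1, h2⟩ := bm_inv A c 0 le_rfl
  have hx2 := h2 x
  by_contra hne
  simp only [mul_zero, ite_self, if_neg hne] at hx2
  omega

-- A's loop never fires when no element has a strict-majority total count.
theorem loop_no_majority (A : List Int) (d : PySem.Dict Int Int) (pre xs : List Int)
    (hA : A = pre ++ xs)
    (hd : ∀ x, d.getD x 0 = (pre.count x : Int))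
    (hno : ∀ x, (A.count x : Int) ≤ PySem.Int.floordiv (A.length : Int) 2) :
    solutionLoop A (A.length : Int) d (pre.length : Int) = -1 := by
  have hfd : PySem.Int.floordiv ((A.length : Int)) 2 = (A.length : Int) / 2 :=
    PySem.Int.floordiv_eq_ediv_of_pos (by norm_num)
  induction xs generalizing pre d with
  | nil =>
    rw [solutionLoop]
    rw [dif_neg (by simp [hA])]
  | cons x xs ih =>
    have hlt : ((pre.length : Int)) < (A.length : Int) := by
      simp only [hA, List.length_append, List.length_cons]; push_cast; omega
    have hx : PySem.List.pyGetD A ((pre.length : Int)) 0 = x := by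
      rw [PySem.List.pyGetD_natCast, hA]
      simp [List.getD]
    rw [solutionLoop, dif_pos hlt]
    simp only [hx]
    set d' := if d.contains x then d.modify x 0 (· + 1) else d.insert x 1 with hd'def
    have hd' : ∀ y, d'.getD y 0 = (pre.count y : Int) + (if y = x then 1 else 0) := by
      intro y
      rw [hd'def]
      split
      · rw [PySem.Dict.getD_modify]
        rcases eq_or_ne y x with h | h <;> simp [h, hd]
      · rename_i hnc
        rw [PySem.Dict.getD_insert]
        have h0 : (pre.count x : Int) = 0 := by
          rw [← hd x]
          simp only [Bool.not_eq_true] at hnc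
          simp [PySem.Dict.getD_of_not_contains, hnc]
        rcases eq_or_ne y x with h | h <;> simp [h, hd, h0]
    have hcnt : (pre.count x : Int) + 1 ≤ (A.count x : Int) := by
      simp [hA, List.count_append]
    have hnofire : isDominator (d'.getD x 0) (A.length : Int) = false := by
      have hno' := hno x
      rw [hfd] at hno'
      simp [isDominator, hd' x]
      omega
    rw [hnofire]
    simp only [Bool.false_eq_true, if_false]
    have hlen1 : (pre.length : Int) + 1 = ((pre ++ [x]).length : Int) := by simp
    rw [hlen1]
    exact ih d' (pre ++ [x]) (by simp [hA]) (by
      intro y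
      rw [hd' y]
      rcases eq_or_ne y x with h | h
      · simp [h, List.count_append]
      · simp [h, Ne.symm h, List.count_append])

-- Joint simulation: A's loop and B's locating scan return the same index, given
-- that c is the unique strict-majority element.
theorem loop_eq_scan (A : List Int) (c : Int) (d : PySem.Dict Int Int) (pre xs : List Int)
    (hA : A = pre ++ xs)
    (hd : ∀ x, d.getD x 0 = (pre.count x : Int))
    (huniq : ∀ x, PySem.Int.floordiv (A.length : Int) 2 < (A.count x : Int) → x = c) :
    solutionLoop A (A.length : Int) d (pre.length : Int) =
      scanLoop c (PySem.Int.floordiv (A.length : Int) 2) xs (pre.length : Int) (pre.count c : Int) := by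
  have hfd : PySem.Int.floordiv ((A.length : Int)) 2 = (A.length : Int) / 2 :=
    PySem.Int.floordiv_eq_ediv_of_pos (by norm_num)
  induction xs generalizing pre d with
  | nil =>
    rw [solutionLoop]
    rw [dif_neg (by simp [hA])]
    rfl
  | cons x xs ih =>
    have hlt : ((pre.length : Int)) < (A.length : Int) := by
      simp only [hA, List.length_append, List.length_cons]; push_cast; omega
    have hx : PySem.List.pyGetD A ((pre.length : Int)) 0 = x := by
      rw [PySem.List.pyGetD_natCast, hA]
      simp [List.getD]
    rw [solutionLoop, dif_pos hlt]
    simp only [hx]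
    set d' := if d.contains x then d.modify x 0 (· + 1) else d.insert x 1 with hd'def
    have hd' : ∀ y, d'.getD y 0 = (pre.count y : Int) + (if y = x then 1 else 0) := by
      intro y
      rw [hd'def]
      split
      · rw [PySem.Dict.getD_modify]
        rcases eq_or_ne y x with h | h <;> simp [h, hd]
      · rename_i hnc
        rw [PySem.Dict.getD_insert]
        have h0 : (pre.count x : Int) = 0 := by
          rw [← hd x]
          simp only [Bool.not_eq_true] at hnc
          simp [PySem.Dict.getD_of_not_contains, hnc]
        rcases eq_or_ne y x with h | h <;> simp [h, hd, h0]
    have hcnt : (pre.count x : Int) + 1 ≤ (A.count x : Int) := by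
      simp [hA, List.count_append]
    by_cases hfire : (A.length : Int) / 2 < (pre.count x : Int) + 1
    · -- A fires; x must be the majority candidate, so B fires at the same index
      have hxc : x = c := huniq x (by rw [hfd]; omega)
      have hfA : isDominator (d'.getD x 0) (A.length : Int) = true := by
        simp [isDominator, hd' x]
        omega
      rw [hfA]
      simp only [if_true]
      rw [scanLoop, if_pos hxc, if_pos (by rw [hfd, ← hxc]; omega)]
    · have hnofire : isDominator (d'.getD x 0) (A.length : Int) = false := by
        simp [isDominator, hd' x]
        omega
      rw [hnofire]
      simp only [Bool.false_eq_true, if_false]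
      have hlen1 : (pre.length : Int) + 1 = ((pre ++ [x]).length : Int) := by simp
      have hrec := ih d' (pre ++ [x]) (by simp [hA]) (by
        intro y
        rw [hd' y]
        rcases eq_or_ne y x with h | h
        · simp [h, List.count_append]
        · simp [h, Ne.symm h, List.count_append])
      rw [scanLoop]
      rcases eq_or_ne x c with hxc | hxc
      · rw [if_pos hxc]
        rw [if_neg (by rw [hfd, ← hxc]; omega)]
        rw [hlen1, hrec]
        congr 1
        subst hxc
        simp [List.count_append]
      · rw [if_neg hxc]
        rw [hlen1, hrec]
        congr 1
        simp [List.count_append, hxc]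

-- ===== VERDICT (by name: the statement is the Claim_ definition above) =====
theorem solution_singleton (x : Int) : solution [x] = solution_alt [x] := by
  simp [solution, solution_alt, bmStep, scanLoop]

theorem solution_spec : Claim_equal_solution := by
  intro A _
  unfold Spec_solution
  match A with
  | [] => rfl
  | [x] => exact (solution_singleton x).symm ▸ rfl
  | x :: y :: rest =>
    set l := x :: y :: rest with hl
    have hN0 : ((l.length : Int)) ≠ 0 := by simp [hl]; omega
    have hN1 : ((l.length : Int)) ≠ 1 := by simp [hl]; omega
    have hfd : PySem.Int.floordiv ((l.length : Int)) 2 = (l.length : Int) / 2 :=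
      PySem.Int.floordiv_eq_ediv_of_pos (by norm_num)
    have huniq : ∀ z, PySem.Int.floordiv ((l.length : Int)) 2 < (l.count z : Int) →
        z = (l.foldl bmStep (PySem.List.pyGetD l 0 0, 0)).1 := by
      intro z hz
      apply bm_majority
      rw [hfd] at hz
      omega
    rw [solution, solution_alt]
    simp only [if_neg hN0, if_neg hN1]
    by_cases hm : (l.count (l.foldl bmStep (PySem.List.pyGetD l 0 0, 0)).1 : Int) ≤
        PySem.Int.floordiv ((l.length : Int)) 2
    · rw [if_pos hm]
      have hno : ∀ z, (l.count z : Int) ≤ PySem.Int.floordiv ((l.length : Int)) 2 := by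
        intro z
        by_contra hc
        push Not at hc
        rw [huniq z hc] at hc
        omega
      have := loop_no_majority l PySem.Dict.empty [] l rfl
        (by intro z; simp [PySem.Dict.getD_empty]) hno
      simpa using this
    · rw [if_neg hm]
      have := loop_eq_scan l (l.foldl bmStep (PySem.List.pyGetD l 0 0, 0)).1
        PySem.Dict.empty [] l rfl (by intro z; simp [PySem.Dict.getD_empty]) huniq
      simpa using this
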